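-- pv_equiv track=rewrite | github.com/terracorp-private/AoC | 2015/3.py | santa_moves
-- ===== SOURCE A (Python) =====
-- def santa_moves(line: list[str]) -> set:
--     x: int = 0
--     y: int = 0
--     santa_trail: list[int] = []
--     for turn, movement in enumerate(line):
--         if movement == '^':
--             y += 1
--         elif movement == 'v':
--             y -= 1
--         elif movement == '>':
--             x += 1
--         else:
--             x -= 1
--         coords: tuple(int,int) = (x,y)
--         santa_trail.append(coords)
--     houses: set = set(santa_trail)
--     return houses
-- ===== SOURCE B (Python) =====
-- DELTAS = {'^': (0, 1), 'v': (0, -1), '>': (1, 0)}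
--
--
-- def _prefix_sums(v):
--     out = []
--     s = 0
--     for d in v:
--         s += d
--         out.append(s)
--     return out
--
--
-- def santa_moves(line: list[str]) -> set:
--     deltas = [DELTAS.get(c, (-1, 0)) for c in line]
--     xs = _prefix_sums([d[0] for d in deltas])
--     ys = _prefix_sums([d[1] for d in deltas])
--     return set(zip(xs, ys))
-- ===== Notes on version B (the rewrite author's own statement) =====
-- stated objective: alternative
-- what changed: Replaces the mutable (x,y)-state loop with a delta decomposition: each move is mapped to a displacement via a dict (unknown chars default to (-1,0)), the two coordinates are prefix-summed independently, and the visited set is the zip of the two prefix-sum lists.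
import Mathlib
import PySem

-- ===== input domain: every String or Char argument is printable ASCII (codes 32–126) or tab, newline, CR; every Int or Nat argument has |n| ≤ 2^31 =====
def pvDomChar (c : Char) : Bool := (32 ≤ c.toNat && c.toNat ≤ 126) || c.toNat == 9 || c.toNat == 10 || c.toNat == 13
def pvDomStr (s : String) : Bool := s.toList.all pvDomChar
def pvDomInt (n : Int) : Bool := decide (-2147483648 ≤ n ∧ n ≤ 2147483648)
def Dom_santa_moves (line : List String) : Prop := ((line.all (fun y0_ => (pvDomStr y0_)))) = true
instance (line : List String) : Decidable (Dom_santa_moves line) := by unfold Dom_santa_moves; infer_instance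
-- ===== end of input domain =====

-- B reframes A's mutable-state loop as per-move displacements whose coordinates are
-- prefix-summed independently and zipped; objective: alternative (same O(n) cost).

-- ===== PORT A =====
def santaStep (st : Int × Int × List (Int × Int)) (movement : String) :
    Int × Int × List (Int × Int) :=
  let x := st.1
  let y := st.2.1
  let trail := st.2.2
  let xy : Int × Int :=
    if movement = "^" then (x, y + 1)
    else if movement = "v" then (x, y - 1)
    else if movement = ">" then (x + 1, y)
    else (x - 1, y)
  (xy.1, xy.2, trail ++ [xy])

def santa_moves (line : List String) : List (Int × Int) :=
  let st := line.foldl santaStep (0, 0, [])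
  PySem.Set.ofList st.2.2

-- ===== PORT B =====
def pvDELTAS : PySem.Dict String (Int × Int) :=
  PySem.Dict.ofList [("^", (0, 1)), ("v", (0, -1)), (">", (1, 0))]

def pvPrefixSums (v : List Int) : List Int :=
  (v.foldl (fun (st : List Int × Int) d =>
    let s := st.2 + d
    (st.1 ++ [s], s)) ([], 0)).1

def santa_moves_alt (line : List String) : List (Int × Int) :=
  let deltas := line.map (fun c => PySem.Dict.getD pvDELTAS c (-1, 0))
  let xs := pvPrefixSums (deltas.map (fun d => d.1))
  let ys := pvPrefixSums (deltas.map (fun d => d.2))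
  PySem.Set.ofList (xs.zip ys)

-- ===== PRECONDITION & SPEC =====
def Spec_santa_moves (line : List String) (out : List (Int × Int)) : Prop := out = santa_moves_alt line
instance (line : List String) (out : List (Int × Int)) : Decidable (Spec_santa_moves line out) := by unfold Spec_santa_moves; infer_instance

-- ===== CLAIM (what is proved, stated in full; the proofs are below) =====
def Claim_equal_santa_moves : Prop := ∀ (line : List String), Dom_santa_moves line → Spec_santa_moves line (santa_moves line)

-- ===== LEMMAS AND PROOFS =====

-- proof-side displacement of one move
def pvDelta (c : String) : Int × Int :=
  if c = "^" then (0, 1) else if c = "v" then (0, -1) else if c = ">" then (1, 0) else (-1, 0)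

-- proof-side spec: positions visited starting from p
def pvPositions (line : List String) (p : Int × Int) : List (Int × Int) :=
  match line with
  | [] => []
  | c :: cs =>
    let q := (p.1 + (pvDelta c).1, p.2 + (pvDelta c).2)
    q :: pvPositions cs q

theorem getD_eq_pvDelta (c : String) : PySem.Dict.getD pvDELTAS c (-1, 0) = pvDelta c := by
  have hitems : pvDELTAS.items = [("^", (0, 1)), ("v", (0, -1)), (">", (1, 0))] := rfl
  by_cases h1 : c = "^"
  · subst h1; decide
  · by_cases h2 : c = "v"
    · subst h2; decide
    · by_cases h3 : c = ">"
      · subst h3; decide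
      · have e1 : (("^" : String) == c) = false := by simp [BEq.comm]; exact h1
        have e2 : (("v" : String) == c) = false := by simp [BEq.comm]; exact h2
        have e3 : ((">" : String) == c) = false := by simp [BEq.comm]; exact h3
        simp [PySem.Dict.getD, PySem.Dict.get?, hitems, List.find?, e1, e2, e3, pvDelta, h1, h2, h3]

theorem foldA_trail (line : List String) (x y : Int) (trail : List (Int × Int)) :
    (line.foldl santaStep (x, y, trail)).2.2 = trail ++ pvPositions line (x, y) := by
  induction line generalizing x y trail with
  | nil => simp [pvPositions]
  | cons c cs ih =>
    simp only [List.foldl_cons, pvPositions]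
    have hstep : santaStep (x, y, trail) c =
        (x + (pvDelta c).1, y + (pvDelta c).2,
          trail ++ [(x + (pvDelta c).1, y + (pvDelta c).2)]) := by
      simp only [santaStep, pvDelta]
      split_ifs <;> simp [sub_eq_add_neg]
    rw [hstep, ih]
    simp

theorem foldB_zip (line : List String) (x y : Int) (ax ay : List Int) (hlen : ax.length = ay.length) :
    ((line.map (fun c => (pvDelta c).1)).foldl
        (fun (st : List Int × Int) d => (st.1 ++ [st.2 + d], st.2 + d)) (ax, x)).1.zip
      ((line.map (fun c => (pvDelta c).2)).foldl
        (fun (st : List Int × Int) d => (st.1 ++ [st.2 + d], st.2 + d)) (ay, y)).1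
    = ax.zip ay ++ pvPositions line (x, y) := by
  induction line generalizing x y ax ay with
  | nil => simp [pvPositions]
  | cons c cs ih =>
    simp only [List.map_cons, List.foldl_cons, pvPositions]
    rw [ih (x + (pvDelta c).1) (y + (pvDelta c).2) (ax ++ [x + (pvDelta c).1])
        (ay ++ [y + (pvDelta c).2]) (by simp [hlen])]
    rw [List.zip_append hlen]
    simp

-- ===== VERDICT (by name: the statement is the Claim_ definition above) =====
theorem santa_moves_spec : Claim_equal_santa_moves := by
  intro line _
  unfold Spec_santa_moves santa_moves santa_moves_alt pvPrefixSums
  simp only [getD_eq_pvDelta, List.map_map, Function.comp_def]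
  rw [foldA_trail line 0 0 []]
  rw [foldB_zip line 0 0 [] [] rfl]
  simp
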